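-- pv_equiv track=rewrite | github.com/shipperizer/crowdscores | 002-list-length/list_length.py | list_length
-- ===== SOURCE A (Python) =====
-- def list_length(single_method_list):
--     # Implement this function and write some tests for it.
--     # Performance is important
--     prev, next = 0, 1
--     if single_method_list.get(0) is None:
--         return 0
--     elif single_method_list.get(1) is None:
--         return 1
--     else:
--         while prev < next:
--             if single_method_list.get(next) is not None:
--                 prev = next
--                 next *= 2
--             else:
--                 next = int(prev + (next - prev) / 2)
--         return prev + 1
-- ===== SOURCE B (Python) =====
-- def list_length(single_method_list):
--     # Sequential scan: the list's indices are 0,1,2,...; the length is the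
--     # first index whose lookup misses.
--     n = 0
--     while single_method_list.get(n) is not None:
--         n += 1
--     return n
-- ===== Notes on version B (the rewrite author's own statement) =====
-- stated objective: simpler
-- what changed: A's galloping search (exponential doubling of the probe plus float-midpoint bisection retries) is replaced by a three-line sequential scan that probes indices 0,1,2,... until the first missing one; Pre_ excludes dicts that are not a list encoding (both 0 and 1 present but the nonnegative keys not a contiguous prefix), where A's probe-path-dependent boundary and B's first gap are both accidental.
-- outside the precondition, e.g. on list_length({0: 0, 1: 0, 2: 0, 4: 0}): A returns 5, B returns 3
import Mathlib
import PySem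

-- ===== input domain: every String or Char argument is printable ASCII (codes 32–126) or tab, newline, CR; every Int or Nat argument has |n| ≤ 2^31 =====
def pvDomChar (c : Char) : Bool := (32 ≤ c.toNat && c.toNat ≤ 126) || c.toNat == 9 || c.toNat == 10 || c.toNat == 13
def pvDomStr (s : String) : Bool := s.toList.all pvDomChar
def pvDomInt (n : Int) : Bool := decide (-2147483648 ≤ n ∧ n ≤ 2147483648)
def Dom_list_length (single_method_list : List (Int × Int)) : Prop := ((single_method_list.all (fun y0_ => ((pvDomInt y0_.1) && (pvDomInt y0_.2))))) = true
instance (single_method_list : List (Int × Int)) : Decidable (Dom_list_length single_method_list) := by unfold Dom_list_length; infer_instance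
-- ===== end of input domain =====

-- B replaces A's galloping doubling-and-bisection probe search by a plain sequential scan
-- over the indices 0,1,2,… (objective: simpler).

-- ===== PORT A =====
-- A's while loop; fuel is only a totality device (at fuel 0 we return prev + 1, the loop-exit
-- value; the fuel chosen in list_length is proved sufficient inside Pre_ below).
def listLengthLoopA (d : PySem.Dict Int Int) : Nat → Int → Int → Int
  | 0, prev, _next => prev + 1
  | Nat.succ fl, prev, next =>
      if prev < next then
        if (d.get? next).isSome then
          listLengthLoopA d fl next (next * 2)
        else
          -- Python: next = int(prev + (next - prev) / 2); with 0 ≤ prev < next (the reachable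
          -- states) and |keys| ≤ 2^31 the float arithmetic is exact and the truncation is a
          -- floor, so this is prev + (next - prev) // 2 exactly.
          listLengthLoopA d fl prev (prev + PySem.Int.floordiv (next - prev) 2)
      else prev + 1

def list_length (single_method_list : List (Int × Int)) : Int :=
  if ((PySem.Dict.mk single_method_list : PySem.Dict Int Int).get? 0).isNone then 0
  else if ((PySem.Dict.mk single_method_list : PySem.Dict Int Int).get? 1).isNone then 1
  else listLengthLoopA (PySem.Dict.mk single_method_list)
        ((single_method_list.length + 2) * (single_method_list.length + 2)) 0 1

-- ===== PORT B =====
-- Source B's scan: n = 0; while get(n) is not None: n += 1; return n.  Fuel length+1 is a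
-- totality device only: each hit probes a distinct key of the dict, so at most length
-- iterations ever run and the fuel is never exhausted.
def scanLoopB (d : PySem.Dict Int Int) : Nat → Int → Int
  | 0, n => n
  | Nat.succ fl, n => if (d.get? n).isSome then scanLoopB d fl (n + 1) else n

def list_length_alt (single_method_list : List (Int × Int)) : Int :=
  scanLoopB (PySem.Dict.mk single_method_list) (single_method_list.length + 1) 0

-- ===== PRECONDITION & SPEC =====
-- Pre_ excludes dicts that are not an encoding of a list although A's search runs on them:
-- both 0 and 1 present but the nonnegative keys not a contiguous prefix 0..n-1; there A's
-- probe-path-dependent boundary and B's first gap are both accidental values.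
def Pre_list_length (single_method_list : List (Int × Int)) : Prop :=
  ((PySem.Dict.mk single_method_list : PySem.Dict Int Int).get? 0).isNone = true ∨
  ((PySem.Dict.mk single_method_list : PySem.Dict Int Int).get? 1).isNone = true ∨
  ∀ p ∈ single_method_list, 1 ≤ p.1 →
    ((PySem.Dict.mk single_method_list : PySem.Dict Int Int).get? (p.1 - 1)).isSome = true
instance (single_method_list : List (Int × Int)) : Decidable (Pre_list_length single_method_list) := by unfold Pre_list_length; infer_instance

def pvWitness_list_length : (List (Int × Int)) := [(0, 5), (1, 6), (2, 7)]

def Spec_list_length (single_method_list : List (Int × Int)) (out : Int) : Prop := out = list_length_alt single_method_list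
instance (single_method_list : List (Int × Int)) (out : Int) : Decidable (Spec_list_length single_method_list out) := by unfold Spec_list_length; infer_instance

-- ===== CLAIM (what is proved, stated in full; the proofs are below) =====
def Claim_equal_list_length : Prop := ∀ (single_method_list : List (Int × Int)), Dom_list_length single_method_list → Pre_list_length single_method_list → Spec_list_length single_method_list (list_length single_method_list)

-- ===== LEMMAS AND PROOFS =====

-- a key the dict answers on is a key of the underlying list
theorem get?_mk_isSome_mem (l : List (Int × Int)) (k : Int)
    (h : ((PySem.Dict.mk l : PySem.Dict Int Int).get? k).isSome = true) :
    k ∈ l.map Prod.fst := by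
  induction l with
  | nil => simp [PySem.Dict.get?] at h
  | cons p rest ih =>
      rw [PySem.Dict.get?_mk_cons] at h
      by_cases hk : p.1 = k
      · simp [hk]
      · right
        exact ih (by simpa [hk] using h)

-- A's loop exits immediately when prev = next (any fuel).
theorem loopA_self (d : PySem.Dict Int Int) (f : Nat) (lo : Int) :
    listLengthLoopA d f lo lo = lo + 1 := by
  cases f with
  | zero => rfl
  | succ fl => simp [listLengthLoopA]

-- B's scan: bounds, everything below the result is present, and (fuel permitting)
-- the result itself is absent.
theorem scan_props (d : PySem.Dict Int Int) :
    ∀ (f : Nat) (s : Int),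
      s ≤ scanLoopB d f s ∧ scanLoopB d f s ≤ s + f ∧
      (∀ k, s ≤ k → k < scanLoopB d f s → (d.get? k).isSome = true) ∧
      (scanLoopB d f s < s + f → (d.get? (scanLoopB d f s)).isSome = false) := by
  intro f
  induction f with
  | zero =>
      intro s
      refine ⟨le_rfl, by simp [scanLoopB], ?_, ?_⟩
      · simp [scanLoopB]; omega
      · simp [scanLoopB]
  | succ fl ih =>
      intro s
      by_cases hs : (d.get? s).isSome = true
      · have hstep : scanLoopB d (Nat.succ fl) s = scanLoopB d fl (s + 1) := by
          simp [scanLoopB, hs]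
        obtain ⟨h1, h2, h3, h4⟩ := ih (s + 1)
        rw [hstep]
        refine ⟨by omega, by omega, ?_, fun hlt => h4 (by omega)⟩
        intro k hks hkr
        by_cases hk : k = s
        · rwa [hk]
        · exact h3 k (by omega) hkr
      · have hstep : scanLoopB d (Nat.succ fl) s = s := by
          simp [scanLoopB, hs]
        rw [hstep]
        refine ⟨le_rfl, by omega, by omega, fun _ => by simpa using hs⟩

-- all of 0..n-1 present ⇒ n ≤ number of pairs (the indices are distinct keys)
theorem count_le_of_prefix_present (l : List (Int × Int)) (n : Int) (hn : 0 ≤ n)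
    (h : ∀ k : Int, 0 ≤ k → k < n →
      (((PySem.Dict.mk l : PySem.Dict Int Int).get? k).isSome = true)) :
    n.toNat ≤ l.length := by
  have hnd : (List.map Int.ofNat (List.range n.toNat)).Nodup := by
    apply List.Nodup.map
    · exact fun a b hab => Int.ofNat.inj hab
    · exact List.nodup_range
  have hsub : List.map Int.ofNat (List.range n.toNat) ⊆ l.map Prod.fst := by
    intro x hx
    simp only [List.mem_map, List.mem_range] at hx
    obtain ⟨i, hi, rfl⟩ := hx
    exact get?_mk_isSome_mem l _
      (h _ (by simp only [Int.ofNat_eq_natCast]; omega) (by simp only [Int.ofNat_eq_natCast]; omega))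
  have hle := List.Subperm.length_le (List.subperm_of_subset hnd hsub)
  simpa using hle

-- A's galloping loop, on a dict whose present nonnegative keys are exactly 0..m-1,
-- returns m whenever the fuel covers the potential measure.
theorem loopA_mono (d : PySem.Dict Int Int) (m : Int) (hm : 0 < m)
    (mono : ∀ k : Int, 0 ≤ k → ((d.get? k).isSome = true ↔ k < m)) :
    ∀ (f : Nat) (prev next : Int), 0 ≤ prev → prev < m → prev < next →
      (m - prev).toNat * (Nat.log 2 m.toNat + 3) + Nat.log 2 (next - prev).toNat + 2 ≤ f →
      listLengthLoopA d f prev next = m := by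
  intro f
  induction f using Nat.strong_induction_on with
  | _ f IH =>
    intro prev next h0 hpm hpn hfuel
    cases f with
    | zero => omega
    | succ fl =>
      rw [listLengthLoopA, if_pos hpn]
      by_cases hs : (d.get? next).isSome = true
      · -- hit: prev, next := next, 2*next
        have hnext0 : (0 : Int) ≤ next := by omega
        have hnextm : next < m := (mono next hnext0).mp hs
        have hK : Nat.log 2 next.toNat ≤ Nat.log 2 m.toNat :=
          Nat.log_mono_right (by omega)
        have hgK : Nat.log 2 m.toNat + 3 ≤
            (next - prev).toNat * (Nat.log 2 m.toNat + 3) :=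
          Nat.le_mul_of_pos_left _ (by omega)
        rw [if_pos hs]
        refine IH fl (by omega) next (next * 2) hnext0 hnextm (by omega) ?_
        have hsplit : (m - prev).toNat = (m - next).toNat + (next - prev).toNat := by omega
        have hdiff : (next * 2 - next) = next := by ring
        rw [hdiff]
        rw [hsplit, Nat.add_mul] at hfuel
        omega
      · -- miss: next := prev + (next - prev) // 2
        have hmle : m ≤ next := by
          by_contra hcon
          exact hs ((mono next (by omega)).mpr (by omega))
        rw [if_neg hs]
        have hfd : PySem.Int.floordiv (next - prev) 2 = (next - prev) / 2 :=
          PySem.Int.floordiv_eq_ediv_of_pos (by norm_num)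
        by_cases hg1 : next = prev + 1
        · -- gap 1: midpoint is prev itself, the loop exits and returns prev+1 = m
          have : prev + PySem.Int.floordiv (next - prev) 2 = prev := by
            rw [hfd, hg1]; norm_num
          rw [this, loopA_self]
          omega
        · -- gap ≥ 2: the gap halves
          set q : Int := (next - prev) / 2 with hq
          have hq1 : 1 ≤ q := by omega
          have hqlt : q < next - prev := by omega
          have hqN : q.toNat = (next - prev).toNat / 2 := by omega
          have hlogq : Nat.log 2 q.toNat = Nat.log 2 (next - prev).toNat - 1 := by
            rw [hqN]; exact Nat.log_div_base _ _
          have hpos : 0 < Nat.log 2 (next - prev).toNat :=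
            Nat.log_pos (by norm_num) (by omega)
          rw [hfd]
          refine IH fl (by omega) prev (prev + q) h0 hpm (by omega) ?_
          have hgap : (prev + q - prev) = q := by ring
          rw [hgap]
          omega

-- ===== VERDICT (by name: the statement is the Claim_ definition above) =====
theorem list_length_spec : Claim_equal_list_length := by
  intro l _hdom hpre
  unfold Spec_list_length list_length list_length_alt
  by_cases h0 : ((PySem.Dict.mk l : PySem.Dict Int Int).get? 0).isNone = true
  · -- empty list: the scan misses at 0 immediately
    rw [if_pos h0]
    have h0' : ((PySem.Dict.mk l : PySem.Dict Int Int).get? 0).isSome = false := by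
      simpa [Option.isNone_iff_eq_none, Option.isSome_eq_false_iff] using h0
    simp [scanLoopB, h0']
  · rw [if_neg h0]
    have h0' : ((PySem.Dict.mk l : PySem.Dict Int Int).get? 0).isSome = true := by
      simpa [Option.isNone_iff_eq_none, ← Option.ne_none_iff_isSome] using h0
    have hlen : 1 ≤ l.length := by
      have hmem := get?_mk_isSome_mem l 0 h0'
      have hne : l ≠ [] := by rintro rfl; simp at hmem
      exact List.length_pos_iff.mpr hne
    by_cases h1 : ((PySem.Dict.mk l : PySem.Dict Int Int).get? 1).isNone = true
    · -- singleton: hit at 0, miss at 1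
      rw [if_pos h1]
      have h1' : ((PySem.Dict.mk l : PySem.Dict Int Int).get? 1).isSome = false := by
        simpa [Option.isNone_iff_eq_none, Option.isSome_eq_false_iff] using h1
      obtain ⟨L', hL'⟩ : ∃ L', l.length = L' + 1 := ⟨l.length - 1, by omega⟩
      rw [hL']
      simp [scanLoopB, h0', h1']
    · rw [if_neg h1]
      have h1' : ((PySem.Dict.mk l : PySem.Dict Int Int).get? 1).isSome = true := by
        simpa [Option.isNone_iff_eq_none, ← Option.ne_none_iff_isSome] using h1
      have hdcl : ∀ p ∈ l, 1 ≤ p.1 →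
          ((PySem.Dict.mk l : PySem.Dict Int Int).get? (p.1 - 1)).isSome = true := by
        rcases hpre with hc | hc | hc
        · rw [Option.isNone_iff_eq_none] at hc; rw [hc] at h0'; simp at h0'
        · rw [Option.isNone_iff_eq_none] at hc; rw [hc] at h1'; simp at h1'
        · exact hc
      set d := (PySem.Dict.mk l : PySem.Dict Int Int) with hd
      -- downward closure of the present nonnegative keys
      have hdc : ∀ k : Int, 1 ≤ k → (d.get? k).isSome = true →
          (d.get? (k - 1)).isSome = true := by
        intro k hk hks
        have hmem := get?_mk_isSome_mem l k hks
        simp only [List.mem_map] at hmem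
        obtain ⟨p, hp, hpk⟩ := hmem
        have := hdcl p hp (by omega)
        rwa [hpk] at this
      set n : Int := scanLoopB d (l.length + 1) 0 with hn
      obtain ⟨hs1, hs2, hs3, hs4⟩ := scan_props d (l.length + 1) 0
      rw [← hn] at hs1 hs2 hs3 hs4
      have hits : ∀ k : Int, 0 ≤ k → k < n → (d.get? k).isSome = true :=
        fun k hk hkn => hs3 k hk hkn
      have hnle : n.toNat ≤ l.length := count_le_of_prefix_present l n hs1 hits
      have hmiss : (d.get? n).isSome = false := hs4 (by omega)
      -- nothing from n upward is present (downward closure would pull it to n)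
      have hup : ∀ j : Nat, ∀ k : Int, k = n + j → (d.get? k).isSome = true → False := by
        intro j
        induction j with
        | zero => intro k hk hks; rw [hk] at hks; simp at hks; rw [hks] at hmiss; simp at hmiss
        | succ j ih =>
            intro k hk hks
            have hk1 : 1 ≤ k := by
              have hn2 : 0 < n := by
                by_contra hcon
                have : n = 0 := by omega
                rw [this] at hmiss; rw [hmiss] at h0'; simp at h0'
              omega
            exact ih (k - 1) (by omega) (hdc k hk1 hks)
      have mono : ∀ k : Int, 0 ≤ k → ((d.get? k).isSome = true ↔ k < n) := by
        intro k hk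
        constructor
        · intro hks
          by_contra hcon
          exact hup (k - n).toNat k (by omega) hks
        · intro hkn; exact hits k hk hkn
      have hn2 : 2 ≤ n := by
        have := (mono 1 (by norm_num)).mp h1'
        omega
      -- fuel of A's port covers the measure
      have hlogle : Nat.log 2 n.toNat ≤ l.length :=
        le_trans (Nat.log_le_self _ _) hnle
      have hmul : n.toNat * (Nat.log 2 n.toNat + 3) ≤ l.length * (l.length + 3) :=
        Nat.mul_le_mul hnle (by omega)
      have hsq : l.length * (l.length + 3) + (l.length + 4) =
          (l.length + 2) * (l.length + 2) := by ring
      refine loopA_mono d n (by omega) mono _ 0 1 le_rfl (by omega) (by norm_num) ?_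
      have h10 : ((1 : Int) - 0).toNat = 1 := by norm_num
      rw [h10]
      simp only [Nat.log_one_right, sub_zero]
      omega
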